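-- pv_equiv track=rewrite | github.com/wozlsla/algorithm | programmers/basic/2410/140108.py | solution
-- ===== SOURCE A (Python) =====
-- def solution(s):
--     cnt = 0
--     sav1 = 0
--     sav2 = 0
--
--     for i in s:
--         if sav1 == sav2:
--             cnt += 1
--             a = i
--
--         if i == a:
--             sav1 += 1
--         else:
--             sav2 += 1
--     return cnt
-- ===== SOURCE B (Python) =====
-- def solution(s):
--     n = len(s)
--     count = 0
--     i = 0
--     while i < n:
--         count += 1
--         c = s[i]
--         # a complete group starting at i is the shortest even-length block in which
--         # exactly half the characters equal its first character c; scan candidate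
--         # block lengths two characters at a time, keeping cnt = occurrences of c
--         nxt = n
--         cnt = 0
--         for L in range(2, n - i + 1, 2):
--             cnt += (s[i + L - 2] == c) + (s[i + L - 1] == c)
--             if 2 * cnt == L:
--                 nxt = i + L
--                 break
--         i = nxt
--     return count
-- ===== Notes on version B (the rewrite author's own statement) =====
-- stated objective: alternative
-- what changed: Replaces A's single flat scan carrying same/diff counters and a resetting current-first-char by a per-group search that characterises a group end as the shortest even-length block in which the group's first character occurs exactly half the time, advancing two characters per step.
import Mathlib
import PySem

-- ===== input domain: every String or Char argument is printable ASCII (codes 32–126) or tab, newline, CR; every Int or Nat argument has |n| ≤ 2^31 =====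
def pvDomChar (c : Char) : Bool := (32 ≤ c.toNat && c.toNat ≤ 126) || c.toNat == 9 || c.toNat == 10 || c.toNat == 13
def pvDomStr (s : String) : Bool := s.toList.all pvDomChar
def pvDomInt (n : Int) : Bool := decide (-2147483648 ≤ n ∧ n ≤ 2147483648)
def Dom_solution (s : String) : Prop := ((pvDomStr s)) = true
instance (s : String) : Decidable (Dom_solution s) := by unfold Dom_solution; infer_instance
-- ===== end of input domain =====

-- B replaces A's running same/diff counters by a per-group search: a group end is the
-- shortest even-length block whose first character occurs exactly half the time
-- (tested via occurrence counting over index ranges); same return value, no speed claim.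

-- ===== PORT A =====
-- state = (cnt, sav1, sav2, a); Python's `a` is unbound before the first iteration and
-- never read there (sav1 == sav2 initially forces an assignment), so it starts at ' '.
def stepA (st : Int × Int × Int × Char) (i : Char) : Int × Int × Int × Char :=
  let (cnt, sav1, sav2, a) := st
  let (cnt, a) := if sav1 = sav2 then (cnt + 1, i) else (cnt, a)
  if i = a then (cnt, sav1 + 1, sav2, a) else (cnt, sav1, sav2 + 1, a)

def solution (s : String) : Int :=
  (s.toList.foldl stepA (0, 0, 0, ' ')).1

-- ===== PORT B =====
-- the `for L in range(2, n - i + 1, 2): … break` search of Source B, carrying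
-- cnt = occurrences of c in s[i:i+L]; the fuel argument only bounds the number of
-- iterations (the loop runs at most (n-i)/2+1 times, so fuel = n - i + 2 is never
-- exhausted) and makes the recursion structural; s[i+L-2] and s[i+L-1] are in range
-- whenever L ≤ n - i, so getD is exact there
def findEndF (l : List Char) (c : Char) (i n : Nat) : Nat → Nat → Nat → Nat
  | 0, _, _ => n
  | fuel + 1, L, cnt =>
    if L ≤ n - i then
      let cnt' := cnt + (if l.getD (i + L - 2) ' ' == c then 1 else 0)
                      + (if l.getD (i + L - 1) ' ' == c then 1 else 0)
      if 2 * cnt' = L then i + L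
      else findEndF l c i n fuel (L + 2) cnt'
    else n

def findEnd (l : List Char) (c : Char) (i n L cnt : Nat) : Nat :=
  findEndF l c i n (n - i + 2) L cnt

-- the outer `while i < n` loop of Source B; i strictly increases each iteration, so
-- fuel = n - i + 1 is never exhausted
def loopBF (l : List Char) (n : Nat) : Nat → Nat → Nat → Nat
  | 0, count, _ => count
  | fuel + 1, count, i =>
    if i < n then loopBF l n fuel (count + 1) (findEnd l (l.getD i ' ') i n 2 0)
    else count

def loopB (l : List Char) (n : Nat) (count i : Nat) : Nat :=
  loopBF l n (n - i + 1) count i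

def solution_alt (s : String) : Int :=
  (loopB s.toList s.toList.length 0 0 : Int)

-- ===== PRECONDITION & SPEC =====
def Spec_solution (s : String) (out : Int) : Prop := out = solution_alt s
instance (s : String) (out : Int) : Decidable (Spec_solution s out) := by unfold Spec_solution; infer_instance

-- ===== CLAIM (what is proved, stated in full; the proofs are below) =====
def Claim_equal_solution : Prop := ∀ (s : String), Dom_solution s → Spec_solution s (solution s)

-- ===== LEMMAS AND PROOFS =====

-- proof-side model of one group: consume characters until the ±1 balance reaches 0
def skipGroup (first : Char) (bal : Int) (l : List Char) : List Char :=
  if bal = 0 then l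
  else match l with
    | [] => []
    | c :: rest => skipGroup first (if c = first then bal + 1 else bal - 1) rest

theorem skipGroup_length_le (first : Char) (bal : Int) (l : List Char) :
    (skipGroup first bal l).length ≤ l.length := by
  induction l generalizing bal with
  | nil => unfold skipGroup; split <;> simp
  | cons c rest ih =>
    unfold skipGroup
    split
    · simp
    · exact le_trans (ih _) (Nat.le_succ _)

def countGroups : List Char → Int
  | [] => 0
  | c :: rest => 1 + countGroups (skipGroup c 1 rest)
termination_by l => l.length
decreasing_by
  exact Nat.lt_succ_of_le (skipGroup_length_le c 1 rest)

theorem skipGroup_zero (first : Char) (l : List Char) : skipGroup first 0 l = l := by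
  unfold skipGroup; simp

theorem skipGroup_nil (first : Char) (bal : Int) : skipGroup first bal [] = [] := by
  unfold skipGroup; split <;> rfl

theorem skipGroup_cons (first : Char) (bal : Int) (c : Char) (rest : List Char)
    (h : bal ≠ 0) :
    skipGroup first bal (c :: rest)
      = skipGroup first (if c = first then bal + 1 else bal - 1) rest := by
  conv_lhs => rw [skipGroup]
  rw [if_neg h]

-- ±1 balance of a block relative to the character c
def bal (c : Char) (xs : List Char) : Int :=
  2 * (xs.countP (· == c) : Int) - xs.length

theorem if_add_sub (p : Prop) [inst : Decidable p] (b : Int) :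
    (if p then b + 1 else b - 1) = b + (if p then 1 else -1) := by
  split <;> ring

theorem bal_append_singleton (c x : Char) (xs : List Char) :
    bal c (xs ++ [x]) = bal c xs + (if x = c then 1 else -1) := by
  by_cases h : x = c <;>
    simp [bal, List.countP_append, h] <;> ring

theorem take_succ_eq (l : List Char) (i t : Nat) (h : i + t < l.length) :
    (l.drop i).take (t + 1) = (l.drop i).take t ++ [l[i + t]] := by
  rw [List.take_add_one]
  congr 1
  rw [List.getElem?_drop]
  simp [List.getElem?_eq_getElem h]

-- the old A-side lemma: the fold equals the group recursion
theorem foldl_stepA_eq (l : List Char) :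
    ∀ (cnt sav1 sav2 : Int) (a : Char),
      (l.foldl stepA (cnt, sav1, sav2, a)).1
        = cnt + countGroups (skipGroup a (sav1 - sav2) l) := by
  induction l with
  | nil =>
    intro cnt sav1 sav2 a
    unfold skipGroup
    split <;> simp [countGroups]
  | cons c rest ih =>
    intro cnt sav1 sav2 a
    by_cases h : sav1 = sav2
    · have hz : sav1 - sav2 = 0 := by omega
      have hs : sav1 + 1 - sav2 = 1 := by omega
      have hstep : stepA (cnt, sav1, sav2, a) c = (cnt + 1, sav1 + 1, sav2, c) := by
        simp [stepA, h]
      rw [List.foldl_cons, hstep, ih, hs, hz, skipGroup_zero]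
      have : countGroups (c :: rest) = 1 + countGroups (skipGroup c 1 rest) := by
        conv_lhs => rw [countGroups]
      rw [this]
      ring
    · have hz : sav1 - sav2 ≠ 0 := by omega
      rw [List.foldl_cons, skipGroup_cons _ _ _ _ hz]
      by_cases hc : c = a
      · have hstep : stepA (cnt, sav1, sav2, a) c = (cnt, sav1 + 1, sav2, a) := by
          simp [stepA, h, hc]
        have h1 : sav1 + 1 - sav2 = sav1 - sav2 + 1 := by ring
        rw [hstep, ih, h1, if_pos hc]
      · have hstep : stepA (cnt, sav1, sav2, a) c = (cnt, sav1, sav2 + 1, a) := by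
          simp [stepA, h, hc]
        have h2 : sav1 - (sav2 + 1) = sav1 - sav2 - 1 := by ring
        rw [hstep, ih, h2, if_neg hc]

-- core bridge: the shortest-even-block search finds exactly the point where the
-- balance-consuming model stops
theorem findEndF_gt (l : List Char) (c : Char) (i n : Nat) :
    ∀ (fuel : Nat), ∀ L cnt, 1 ≤ L → i < n → i < findEndF l c i n fuel L cnt := by
  intro fuel
  induction fuel with
  | zero => intro L cnt h1 hin; simp only [findEndF]; omega
  | succ fuel ih =>
    intro L cnt h1 hin
    simp only [findEndF]
    split
    · repeat' split
      all_goals first | omega | exact ih (L + 2) _ (by omega) hin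
    · omega

theorem findEnd_gt (l : List Char) (c : Char) (i n L cnt : Nat) (h1 : 1 ≤ L)
    (hin : i < n) : i < findEnd l c i n L cnt :=
  findEndF_gt l c i n (n - i + 2) L cnt h1 hin

-- core bridge: the shortest-even-half-count block search finds exactly the point where
-- the balance-consuming model stops
theorem findEndF_skipGroup (l : List Char) (c : Char) (i : Nat) :
    ∀ (fuel : Nat), ∀ L cnt, l.length - i + 2 ≤ L + 2 * fuel → 2 ≤ L → L % 2 = 0 →
      cnt = ((l.drop i).take (L - 2)).countP (· == c) →
      bal c ((l.drop i).take (L - 1)) ≠ 0 →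
      l.drop (findEndF l c i l.length fuel L cnt)
        = skipGroup c (bal c ((l.drop i).take (L - 1))) (l.drop (i + L - 1)) := by
  intro fuel
  induction fuel with
  | zero =>
    intro L cnt hF h2 hev hcnt hbal
    simp only [findEndF]
    have h1 : l.drop l.length = [] := by simp
    have h2' : l.drop (i + L - 1) = [] := List.drop_eq_nil_of_le (by omega)
    rw [h1, h2', skipGroup_nil]
  | succ fuel ih =>
    intro L cnt hF h2 hev hcnt hbal
    simp only [findEndF]
    by_cases hle : L ≤ l.length - i
    · rw [if_pos hle]
      have hiL : i + L ≤ l.length := by omega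
      have hx2 : i + (L - 2) < l.length := by omega
      have hx : i + (L - 1) < l.length := by omega
      have hdropx : l.drop (i + L - 1) = l[i + (L - 1)] :: l.drop (i + L) := by
        rw [show i + L - 1 = i + (L - 1) from by omega, List.drop_eq_getElem_cons hx,
            show i + (L - 1) + 1 = i + L from by omega]
      have htake1 : (l.drop i).take (L - 1)
          = (l.drop i).take (L - 2) ++ [l[i + (L - 2)]] := by
        have h' := take_succ_eq l i (L - 2) hx2
        rw [show L - 2 + 1 = L - 1 from by omega] at h'
        exact h'
      have htake : (l.drop i).take L = (l.drop i).take (L - 1) ++ [l[i + (L - 1)]] := by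
        have h' := take_succ_eq l i (L - 1) hx
        rw [show L - 1 + 1 = L from by omega] at h'
        exact h'
      have hgetD2 : l.getD (i + L - 2) ' ' = l[i + (L - 2)] := by
        rw [show i + L - 2 = i + (L - 2) from by omega]
        exact List.getD_eq_getElem l ' ' hx2
      have hgetD1 : l.getD (i + L - 1) ' ' = l[i + (L - 1)] := by
        rw [show i + L - 1 = i + (L - 1) from by omega]
        exact List.getD_eq_getElem l ' ' hx
      -- the incrementally maintained cnt' is the occurrence count over the whole block
      have hcount : cnt + (if l.getD (i + L - 2) ' ' == c then 1 else 0)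
            + (if l.getD (i + L - 1) ' ' == c then 1 else 0)
          = ((l.drop i).take L).countP (· == c) := by
        rw [hgetD2, hgetD1, htake, htake1, hcnt]
        simp [List.countP_append, List.countP_cons]
        split_ifs <;> omega
      have hlenL : ((l.drop i).take L).length = L := by
        simp
        omega
      have hbalL : bal c ((l.drop i).take L)
          = bal c ((l.drop i).take (L - 1))
            + (if l[i + (L - 1)] = c then 1 else -1) := by
        rw [htake, bal_append_singleton]
      by_cases hz : 2 * (cnt + (if l.getD (i + L - 2) ' ' == c then 1 else 0)
            + (if l.getD (i + L - 1) ' ' == c then 1 else 0)) = L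
      · rw [if_pos hz]
        have hbal0 : bal c ((l.drop i).take L) = 0 := by
          rw [bal, hlenL]
          rw [hcount] at hz
          omega
        rw [hdropx, skipGroup_cons _ _ _ _ hbal, if_add_sub _ _, ← hbalL, hbal0,
            skipGroup_zero]
      · rw [if_neg hz]
        have hbalLne : bal c ((l.drop i).take L) ≠ 0 := by
          rw [bal, hlenL]
          rw [hcount] at hz
          intro hcon
          apply hz
          omega
        have hstep1 : skipGroup c (bal c ((l.drop i).take (L - 1))) (l.drop (i + L - 1))
            = skipGroup c (bal c ((l.drop i).take L)) (l.drop (i + L)) := by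
          rw [hdropx, skipGroup_cons _ _ _ _ hbal, if_add_sub _ _, ← hbalL]
        have hcnt2 : cnt + (if l.getD (i + L - 2) ' ' == c then 1 else 0)
              + (if l.getD (i + L - 1) ' ' == c then 1 else 0)
            = ((l.drop i).take (L + 2 - 2)).countP (· == c) := by
          rw [show L + 2 - 2 = L from by omega]
          exact hcount
        by_cases hy : i + L < l.length
        · have hdropy : l.drop (i + L) = l[i + L] :: l.drop (i + L + 1) :=
            List.drop_eq_getElem_cons hy
          have htake2 : (l.drop i).take (L + 1) = (l.drop i).take L ++ [l[i + L]] :=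
            take_succ_eq l i L hy
          have hbalL1 : bal c ((l.drop i).take (L + 1))
              = bal c ((l.drop i).take L) + (if l[i + L] = c then 1 else -1) := by
            rw [htake2, bal_append_singleton]
          have hbalL1ne : bal c ((l.drop i).take (L + 1)) ≠ 0 := by
            -- parity: an even-length block has even balance, so the balance at L+1 is odd
            rw [hbalL1, bal, hlenL]
            split_ifs <;> omega
          have := ih (L + 2) _ (by omega) (by omega) (by omega) hcnt2
            (by rw [show L + 2 - 1 = L + 1 from by omega]; exact hbalL1ne)
          rw [show i + (L + 2) - 1 = i + L + 1 from by omega,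
              show L + 2 - 1 = L + 1 from by omega] at this
          rw [this, hstep1, hdropy, skipGroup_cons _ _ _ _ hbalLne, if_add_sub _ _,
              ← hbalL1]
        · -- i + L = l.length: everything past the block is empty on both sides
          have hEq : i + L = l.length := by omega
          have hld : (l.drop i).length = L := by simp; omega
          have htake2 : (l.drop i).take (L + 1) = (l.drop i).take L := by
            rw [List.take_of_length_le (by rw [hld]; omega),
                List.take_of_length_le (by rw [hld])]
          have := ih (L + 2) _ (by omega) (by omega) (by omega) hcnt2
            (by rw [show L + 2 - 1 = L + 1 from by omega, htake2]; exact hbalLne)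
          rw [show i + (L + 2) - 1 = i + L + 1 from by omega,
              show L + 2 - 1 = L + 1 from by omega, htake2] at this
          rw [this, hstep1]
          have h1 : l.drop (i + L) = [] := List.drop_eq_nil_of_le (by omega)
          have h2' : l.drop (i + L + 1) = [] := List.drop_eq_nil_of_le (by omega)
          rw [h1, h2', skipGroup_nil]
    · rw [if_neg hle]
      have h1 : l.drop l.length = [] := by simp
      have h2' : l.drop (i + L - 1) = [] := List.drop_eq_nil_of_le (by omega)
      rw [h1, h2', skipGroup_nil]

theorem findEnd_skipGroup (l : List Char) (c : Char) (i : Nat)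
    (hbal : bal c ((l.drop i).take 1) ≠ 0) :
    l.drop (findEnd l c i l.length 2 0)
      = skipGroup c (bal c ((l.drop i).take 1)) (l.drop (i + 1)) := by
  have := findEndF_skipGroup l c i (l.length - i + 2) 2 0 (by omega) (by omega)
    (by omega) (by simp) hbal
  simpa [findEnd] using this

theorem loopBF_eq (l : List Char) :
    ∀ (fuel : Nat), ∀ i count, l.length - i + 1 ≤ fuel →
      (loopBF l l.length fuel count i : Int) = (count : Int) + countGroups (l.drop i) := by
  intro fuel
  induction fuel with
  | zero => intro i count hF; omega
  | succ fuel ih =>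
    intro i count hF
    simp only [loopBF]
    by_cases h : i < l.length
    · rw [if_pos h]
      have hc : l.getD i ' ' = l[i] := List.getD_eq_getElem l ' ' h
      have hdrop : l.drop i = l[i] :: l.drop (i + 1) := List.drop_eq_getElem_cons h
      have htake1 : (l.drop i).take 1 = [l[i]] := by
        rw [hdrop]; rfl
      have hbal1 : bal l[i] [l[i]] = 1 := by
        simp [bal]
      have hmain := findEnd_skipGroup l l[i] i (by rw [htake1, hbal1]; omega)
      rw [htake1, hbal1] at hmain
      have hnext : i < findEnd l l[i] i l.length 2 0 :=
        findEnd_gt l l[i] i l.length 2 0 (by omega) h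
      have hIH := ih (findEnd l l[i] i l.length 2 0) (count + 1) (by omega)
      rw [hc, hIH, hmain]
      have hCG : countGroups (l.drop i)
          = 1 + countGroups (skipGroup l[i] 1 (l.drop (i + 1))) := by
        conv_lhs => rw [hdrop, countGroups]
      rw [hCG]
      push_cast
      ring
    · rw [if_neg h]
      have : l.drop i = [] := List.drop_eq_nil_of_le (by omega)
      rw [this]
      simp [countGroups]

-- ===== VERDICT (by name: the statement is the Claim_ definition above) =====
theorem solution_spec : Claim_equal_solution := by
  intro s _
  unfold Spec_solution solution solution_alt
  rw [foldl_stepA_eq]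
  rw [show loopB s.toList s.toList.length 0 0
        = loopBF s.toList s.toList.length (s.toList.length - 0 + 1) 0 0 from rfl]
  rw [loopBF_eq s.toList (s.toList.length - 0 + 1) 0 0 (by omega)]
  norm_num [skipGroup_zero]
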